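-- pv_equiv track=rewrite | github.com/DylanTMeyers/n_queens | dmeyers_nqueens.py | queen_moves
-- ===== SOURCE A (Python) =====
-- def queen_moves(board, curr_queen):
--     temp_list = []
--     for i, value in enumerate(board):
--         for x, value in enumerate(board[i]):
--
--             if i == curr_queen[0] and x == curr_queen[1]:
--                 continue
--             elif board[i][x] == "Q" and (i == curr_queen[0] or x == curr_queen[1] or curr_queen[0] + curr_queen[1] == x + i or curr_queen[0] -i == curr_queen[1]- x):
--                 temp_list.append((True,f'{curr_queen[0]},{curr_queen[1]}', f'{i},{x}') )
--             elif i == curr_queen[0] or x == curr_queen[1] or curr_queen[0] + curr_queen[1] == x + i or curr_queen[0] -i == curr_queen[1]- x: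
--                 temp_list.append((False,f'{curr_queen[0]},{curr_queen[1]}', f'{i},{x}') )
--
--
--     return temp_list
-- ===== SOURCE B (Python) =====
-- def queen_moves(board, curr_queen):
--     # Visits only the cells on the queen's row/column/diagonals instead of scanning the whole board.
--     q0, q1 = curr_queen[0], curr_queen[1]
--     qs = f'{q0},{q1}'
--     res = []
--     for i, row in enumerate(board):
--         n = len(row)
--         if i == q0:
--             xs = [x for x in range(n) if x != q1]
--         else:
--             d = abs(q0 - i)
--             xs = [x for x in (q1 - d, q1, q1 + d) if 0 <= x < n]
--         for x in xs:
--             res.append((row[x] == "Q", qs, f'{i},{x}'))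
--     return res
-- ===== Notes on version B (the rewrite author's own statement) =====
-- stated objective: faster
-- what changed: Instead of scanning every board cell and testing the attack condition, B visits per row only the (at most 3) columns on the queen's column/diagonals (or the whole row when it is the queen's row), emitting them in the same row-major order.
import Mathlib
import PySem

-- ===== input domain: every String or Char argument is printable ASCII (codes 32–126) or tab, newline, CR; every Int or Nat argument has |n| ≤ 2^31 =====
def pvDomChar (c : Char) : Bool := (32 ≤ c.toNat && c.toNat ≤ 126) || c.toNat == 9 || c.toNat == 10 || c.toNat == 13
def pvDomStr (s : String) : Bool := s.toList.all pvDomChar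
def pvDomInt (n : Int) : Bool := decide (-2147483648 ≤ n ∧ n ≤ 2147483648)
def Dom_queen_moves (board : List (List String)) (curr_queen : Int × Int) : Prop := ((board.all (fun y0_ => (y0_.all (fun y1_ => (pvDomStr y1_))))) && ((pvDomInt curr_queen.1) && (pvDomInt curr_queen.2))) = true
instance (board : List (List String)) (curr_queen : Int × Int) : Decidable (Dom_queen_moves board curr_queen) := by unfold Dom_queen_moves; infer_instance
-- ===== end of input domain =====

-- B visits, per row, only the few candidate columns on the queen's lines instead of scanning every cell of the row.


-- f'{a},{b}' (shared literal helper of both ports)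
def cellStr (a b : Int) : String := PySem.Int.toStr a ++ "," ++ PySem.Int.toStr b

-- ===== PORT A =====
-- literal transliteration of A; board[i][x] is exactly the value q.2 bound by the inner enumerate
def queen_moves (board : List (List String)) (curr_queen : Int × Int) : List (Bool × String × String) :=
  (PySem.List.enumerate board 0).foldl (fun temp_list p =>
    (PySem.List.enumerate p.2 0).foldl (fun tl q =>
      if p.1 = curr_queen.1 ∧ q.1 = curr_queen.2 then tl
      else if q.2 = "Q" ∧ (p.1 = curr_queen.1 ∨ q.1 = curr_queen.2 ∨
            curr_queen.1 + curr_queen.2 = q.1 + p.1 ∨ curr_queen.1 - p.1 = curr_queen.2 - q.1) then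
        tl ++ [(true, cellStr curr_queen.1 curr_queen.2, cellStr p.1 q.1)]
      else if p.1 = curr_queen.1 ∨ q.1 = curr_queen.2 ∨
            curr_queen.1 + curr_queen.2 = q.1 + p.1 ∨ curr_queen.1 - p.1 = curr_queen.2 - q.1 then
        tl ++ [(false, cellStr curr_queen.1 curr_queen.2, cellStr p.1 q.1)]
      else tl) temp_list) []

-- ===== PORT B =====
-- transliteration of Source B; the range filter guarantees every index handed to pyGetD is in range (default "" never used)
def queen_moves_alt (board : List (List String)) (curr_queen : Int × Int) : List (Bool × String × String) :=
  (PySem.List.enumerate board 0).foldl (fun res p =>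
    let i : Int := p.1
    let n : Int := p.2.length
    let xs : List Int :=
      if i = curr_queen.1 then
        (PySem.List.pyRange 0 n 1).filter (fun x => decide (x ≠ curr_queen.2))
      else
        let d := |curr_queen.1 - i|
        [curr_queen.2 - d, curr_queen.2, curr_queen.2 + d].filter (fun x => decide (0 ≤ x ∧ x < n))
    res ++ xs.map (fun x =>
      (decide (PySem.List.pyGetD p.2 x "" = "Q"), cellStr curr_queen.1 curr_queen.2, cellStr i x))) []

-- ===== PRECONDITION & SPEC =====
def Spec_queen_moves (board : List (List String)) (curr_queen : Int × Int) (out : List (Bool × String × String)) : Prop := out = queen_moves_alt board curr_queen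
instance (board : List (List String)) (curr_queen : Int × Int) (out : List (Bool × String × String)) : Decidable (Spec_queen_moves board curr_queen out) := by unfold Spec_queen_moves; infer_instance

-- ===== CLAIM (what is proved, stated in full; the proofs are below) =====
def Claim_equal_queen_moves : Prop := ∀ (board : List (List String)) (curr_queen : Int × Int), Dom_queen_moves board curr_queen → Spec_queen_moves board curr_queen (queen_moves board curr_queen)

-- ===== LEMMAS AND PROOFS =====

-- sorted ys: the part below m+1 splits into the part below m and the (at most one) element equal to m
lemma filter_split (m : Int) (hm : 0 ≤ m) :
    ∀ (ys : List Int), ys.Pairwise (· < ·) →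
    ys.filter (fun j => decide (0 ≤ j ∧ j < m + 1)) =
    ys.filter (fun j => decide (0 ≤ j ∧ j < m)) ++ ys.filter (fun j => decide (j = m))
  | [], _ => by simp
  | y :: t, hp => by
    have hlt := (List.pairwise_cons.mp hp).1
    have iht := filter_split m hm t (List.pairwise_cons.mp hp).2
    by_cases h2 : y = m
    · subst h2
      have h3 : t.filter (fun j => decide (0 ≤ j ∧ j < y + 1)) = [] := by
        rw [List.filter_eq_nil_iff]; intro z hz; have := hlt z hz; simp; omega
      have h4 : t.filter (fun j => decide (j = y)) = [] := by
        rw [List.filter_eq_nil_iff]; intro z hz; have := hlt z hz; simp; omega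
      have h5 : t.filter (fun j => decide (0 ≤ j ∧ j < y)) = [] := by
        rw [List.filter_eq_nil_iff]; intro z hz; have := hlt z hz; simp; omega
      simp only [List.filter_cons, h3, h4, h5, decide_eq_true_eq]
      rw [if_pos (by omega), if_neg (by omega)]
      simp
    · by_cases hy : 0 ≤ y ∧ y < m
      · simp only [List.filter_cons, decide_eq_true_eq, iht]
        rw [if_pos (by omega), if_pos hy, if_neg h2]
        simp
      · simp only [List.filter_cons, decide_eq_true_eq, iht]
        rw [if_neg (by omega), if_neg hy, if_neg h2]

lemma filter_eq_of_sorted (v : Int) :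
    ∀ (ys : List Int), ys.Pairwise (· < ·) →
    ys.filter (fun j => decide (j = v)) = if v ∈ ys then [v] else []
  | [], _ => by simp
  | y :: t, hp => by
    have hlt := (List.pairwise_cons.mp hp).1
    have iht := filter_eq_of_sorted v t (List.pairwise_cons.mp hp).2
    by_cases h2 : y = v
    · subst h2
      have h4 : t.filter (fun j => decide (j = y)) = [] := by
        rw [List.filter_eq_nil_iff]; intro z hz; have := hlt z hz; simp; omega
      simp [h4]
    · simp only [List.filter_cons, decide_eq_true_eq, if_neg h2, iht, List.mem_cons]
      by_cases hv : v ∈ t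
      · rw [if_pos hv, if_pos (Or.inr hv)]
      · rw [if_neg hv, if_neg (by tauto)]

-- scanning range(m) for members of a sorted list ys picks out exactly ys ∩ [0, m), in ys's order
lemma pyRange_filter_sorted (ys : List Int) (hys : ys.Pairwise (· < ·)) (m : Nat) :
    (PySem.List.pyRange 0 (m : Int) 1).filter (fun j => decide (j ∈ ys)) =
    ys.filter (fun j => decide (0 ≤ j ∧ j < (m : Int))) := by
  induction m with
  | zero =>
    rw [PySem.List.pyRange_one_eq_nil (by omega)]
    rw [List.filter_nil, Eq.comm, List.filter_eq_nil_iff]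
    intro z _; simp
  | succ m ih =>
    push_cast
    rw [PySem.List.pyRange_one_succ_right (by omega), List.filter_append, ih,
        filter_split (m : Int) (by omega) ys hys, List.filter_singleton,
        filter_eq_of_sorted (m : Int) ys hys]
    by_cases hv : (m : Int) ∈ ys
    · simp [hv]
    · simp [hv]

-- the per-row equality: A's inner scan over a row equals acc ++ B's per-row list
lemma row_eq (cq : Int × Int) (p : Int × List String) (acc : List (Bool × String × String)) :
    (PySem.List.enumerate p.2 0).foldl (fun tl q =>
      if p.1 = cq.1 ∧ q.1 = cq.2 then tl
      else if q.2 = "Q" ∧ (p.1 = cq.1 ∨ q.1 = cq.2 ∨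
            cq.1 + cq.2 = q.1 + p.1 ∨ cq.1 - p.1 = cq.2 - q.1) then
        tl ++ [(true, cellStr cq.1 cq.2, cellStr p.1 q.1)]
      else if p.1 = cq.1 ∨ q.1 = cq.2 ∨
            cq.1 + cq.2 = q.1 + p.1 ∨ cq.1 - p.1 = cq.2 - q.1 then
        tl ++ [(false, cellStr cq.1 cq.2, cellStr p.1 q.1)]
      else tl) acc =
    acc ++ (if p.1 = cq.1 then
        (PySem.List.pyRange 0 (p.2.length : Int) 1).filter (fun x => decide (x ≠ cq.2))
      else
        [cq.2 - |cq.1 - p.1|, cq.2, cq.2 + |cq.1 - p.1|].filter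
          (fun x => decide (0 ≤ x ∧ x < (p.2.length : Int)))).map
      (fun x => (decide (PySem.List.pyGetD p.2 x "" = "Q"), cellStr cq.1 cq.2, cellStr p.1 x)) := by
  -- 1. collapse A's branch chain into one conditional append
  have hbody : ∀ (tl : List (Bool × String × String)) (q : Int × String),
      (if p.1 = cq.1 ∧ q.1 = cq.2 then tl
       else if q.2 = "Q" ∧ (p.1 = cq.1 ∨ q.1 = cq.2 ∨
             cq.1 + cq.2 = q.1 + p.1 ∨ cq.1 - p.1 = cq.2 - q.1) then
         tl ++ [(true, cellStr cq.1 cq.2, cellStr p.1 q.1)]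
       else if p.1 = cq.1 ∨ q.1 = cq.2 ∨
             cq.1 + cq.2 = q.1 + p.1 ∨ cq.1 - p.1 = cq.2 - q.1 then
         tl ++ [(false, cellStr cq.1 cq.2, cellStr p.1 q.1)]
       else tl) =
      (if (¬(p.1 = cq.1 ∧ q.1 = cq.2)) ∧ (p.1 = cq.1 ∨ q.1 = cq.2 ∨
             cq.1 + cq.2 = q.1 + p.1 ∨ cq.1 - p.1 = cq.2 - q.1) then
         tl ++ [(decide (q.2 = "Q"), cellStr cq.1 cq.2, cellStr p.1 q.1)]
       else tl) := by
    intro tl q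
    split_ifs <;> first | rfl | simp_all
  rw [show (fun (tl : List (Bool × String × String)) (q : Int × String) =>
      if p.1 = cq.1 ∧ q.1 = cq.2 then tl
      else if q.2 = "Q" ∧ (p.1 = cq.1 ∨ q.1 = cq.2 ∨
            cq.1 + cq.2 = q.1 + p.1 ∨ cq.1 - p.1 = cq.2 - q.1) then
        tl ++ [(true, cellStr cq.1 cq.2, cellStr p.1 q.1)]
      else if p.1 = cq.1 ∨ q.1 = cq.2 ∨
            cq.1 + cq.2 = q.1 + p.1 ∨ cq.1 - p.1 = cq.2 - q.1 then
        tl ++ [(false, cellStr cq.1 cq.2, cellStr p.1 q.1)]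
      else tl) =
      (fun tl q =>
       if (¬(p.1 = cq.1 ∧ q.1 = cq.2)) ∧ (p.1 = cq.1 ∨ q.1 = cq.2 ∨
             cq.1 + cq.2 = q.1 + p.1 ∨ cq.1 - p.1 = cq.2 - q.1) then
         tl ++ [(decide (q.2 = "Q"), cellStr cq.1 cq.2, cellStr p.1 q.1)]
       else tl)
    from funext fun tl => funext fun q => hbody tl q]
  rw [PySem.List.foldl_append_ite]
  -- 2. express the enumerate as indexed access over range(len(row))
  rw [show PySem.List.enumerate p.2 0 =
        (PySem.List.pyRange 0 (p.2.length : Int) 1).map (fun j => (j, PySem.List.pyGetD p.2 j ""))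
      from by simpa using PySem.List.enumerate_eq_map_pyRange (xs := p.2) (d := "")]
  rw [List.filter_map, List.map_map]
  rw [show ((fun q : Int × String => ((decide (q.2 = "Q") : Bool), cellStr cq.1 cq.2, cellStr p.1 q.1)) ∘
        (fun j : Int => (j, PySem.List.pyGetD p.2 j ""))) =
      (fun x : Int => ((decide (PySem.List.pyGetD p.2 x "" = "Q") : Bool), cellStr cq.1 cq.2, cellStr p.1 x))
    from funext fun j => rfl]
  by_cases hi : p.1 = cq.1
  · rw [if_pos hi]
    have hpred2 : ∀ j ∈ PySem.List.pyRange 0 ((p.2.length : Int)) 1,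
        ((fun x : Int × String => decide (¬(p.1 = cq.1 ∧ x.1 = cq.2) ∧ (p.1 = cq.1 ∨ x.1 = cq.2 ∨
            cq.1 + cq.2 = x.1 + p.1 ∨ cq.1 - p.1 = cq.2 - x.1))) ∘
          (fun j : Int => (j, PySem.List.pyGetD p.2 j ""))) j =
        (fun x : Int => decide (x ≠ cq.2)) j := by
      intro j _
      simp only [Function.comp_apply, decide_eq_decide]
      constructor
      · rintro ⟨hni, _⟩ h; exact hni ⟨hi, h⟩
      · intro hne; exact ⟨fun h => hne h.2, Or.inl hi⟩
    exact congrArg (fun L : List Int => acc ++ L.map (fun x => ((decide (PySem.List.pyGetD p.2 x "" = "Q") : Bool), cellStr cq.1 cq.2, cellStr p.1 x))) (List.filter_congr hpred2)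
  · rw [if_neg hi]
    have hys : ([cq.2 - |cq.1 - p.1|, cq.2, cq.2 + |cq.1 - p.1|] : List Int).Pairwise (· < ·) := by
      have hd : 0 < |cq.1 - p.1| := abs_pos.mpr (by omega)
      simp [List.pairwise_cons]; omega
    have hpred : ∀ j ∈ PySem.List.pyRange 0 ((p.2.length : Int)) 1,
        ((fun x : Int × String => decide (¬(p.1 = cq.1 ∧ x.1 = cq.2) ∧ (p.1 = cq.1 ∨ x.1 = cq.2 ∨
            cq.1 + cq.2 = x.1 + p.1 ∨ cq.1 - p.1 = cq.2 - x.1))) ∘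
          (fun j : Int => (j, PySem.List.pyGetD p.2 j ""))) j =
        (fun j : Int => decide (j ∈ ([cq.2 - |cq.1 - p.1|, cq.2, cq.2 + |cq.1 - p.1|] : List Int))) j := by
      intro j _
      simp only [Function.comp_apply, decide_eq_decide, List.mem_cons, List.not_mem_nil, or_false]
      rcases abs_cases (cq.1 - p.1) with ⟨he, _⟩ | ⟨he, _⟩ <;> rw [he] <;> constructor
      · rintro ⟨_, h2⟩; omega
      · intro h; exact ⟨by omega, by omega⟩
      · rintro ⟨_, h2⟩; omega
      · intro h; exact ⟨by omega, by omega⟩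
    exact congrArg (fun L : List Int => acc ++ L.map (fun x => ((decide (PySem.List.pyGetD p.2 x "" = "Q") : Bool), cellStr cq.1 cq.2, cellStr p.1 x))) ((List.filter_congr hpred).trans (pyRange_filter_sorted _ hys p.2.length))

-- ===== VERDICT (by name: the statement is the Claim_ definition above) =====
theorem queen_moves_spec : Claim_equal_queen_moves := by
  intro board cq _
  show queen_moves board cq = queen_moves_alt board cq
  unfold queen_moves queen_moves_alt
  rw [show (fun (temp_list : List (Bool × String × String)) (p : Int × List String) =>
      (PySem.List.enumerate p.2 0).foldl (fun tl q =>
        if p.1 = cq.1 ∧ q.1 = cq.2 then tl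
        else if q.2 = "Q" ∧ (p.1 = cq.1 ∨ q.1 = cq.2 ∨
              cq.1 + cq.2 = q.1 + p.1 ∨ cq.1 - p.1 = cq.2 - q.1) then
          tl ++ [(true, cellStr cq.1 cq.2, cellStr p.1 q.1)]
        else if p.1 = cq.1 ∨ q.1 = cq.2 ∨
              cq.1 + cq.2 = q.1 + p.1 ∨ cq.1 - p.1 = cq.2 - q.1 then
          tl ++ [(false, cellStr cq.1 cq.2, cellStr p.1 q.1)]
        else tl) temp_list) =
      (fun temp_list p => temp_list ++ (if p.1 = cq.1 then
          (PySem.List.pyRange 0 (p.2.length : Int) 1).filter (fun x => decide (x ≠ cq.2))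
        else
          [cq.2 - |cq.1 - p.1|, cq.2, cq.2 + |cq.1 - p.1|].filter
            (fun x => decide (0 ≤ x ∧ x < (p.2.length : Int)))).map
        (fun x => (decide (PySem.List.pyGetD p.2 x "" = "Q"), cellStr cq.1 cq.2, cellStr p.1 x)))
    from funext fun acc => funext fun p => row_eq cq p acc]
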